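-- pv_equiv track=rewrite | github.com/Theano/libgpuarray | pygpu/array.py | c_contiguous_strides
-- ===== SOURCE A (Python) =====
-- def c_contiguous_strides(itemsize, shape):
--     if shape:
--         strides = [itemsize]
--         for s in shape[:0:-1]:
--             strides.append(strides[-1]*s)
--         return tuple(strides[::-1])
--     else:
--         return ()
-- ===== SOURCE B (Python) =====
-- def c_contiguous_strides(itemsize, shape):
--     # Per-index recomputation: stride i = itemsize * product of trailing dims.
--     def suffix_prod(i):
--         p = 1
--         for s in shape[i + 1:]:
--             p *= s
--         return p
--     return tuple(itemsize * suffix_prod(i) for i in range(len(shape)))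
-- ===== Notes on version B (the rewrite author's own statement) =====
-- stated objective: alternative
-- what changed: Replaces the single backward accumulating pass (append running products, then reverse twice) by an independent per-index computation: stride i is itemsize times the product of the trailing dimensions shape[i+1:], built front-to-back with no accumulator list and no reversal.
import Mathlib
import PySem

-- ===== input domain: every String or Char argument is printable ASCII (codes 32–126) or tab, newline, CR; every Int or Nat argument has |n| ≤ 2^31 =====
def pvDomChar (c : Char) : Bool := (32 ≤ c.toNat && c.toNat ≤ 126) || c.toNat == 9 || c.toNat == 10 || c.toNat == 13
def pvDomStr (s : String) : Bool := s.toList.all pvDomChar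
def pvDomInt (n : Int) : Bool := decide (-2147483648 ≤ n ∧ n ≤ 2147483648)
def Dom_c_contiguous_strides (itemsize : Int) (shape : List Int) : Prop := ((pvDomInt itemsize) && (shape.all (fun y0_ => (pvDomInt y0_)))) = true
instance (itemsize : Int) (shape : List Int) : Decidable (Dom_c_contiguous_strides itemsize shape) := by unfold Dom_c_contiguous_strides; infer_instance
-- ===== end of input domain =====

-- B replaces A's backward accumulating pass (+ two reversals) by an independent
-- per-index suffix-product computation; objective: alternative (same values, different traversal).

-- ===== PORT A =====
def c_contiguous_strides (itemsize : Int) (shape : List Int) : List Int :=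
  if shape ≠ [] then                              -- `if shape:`
    -- shape[:0:-1]; the step (-1) is nonzero so slice? never returns none
    let rev := (PySem.List.slice? shape none (some 0) (-1)).getD []
    -- for s in rev: strides.append(strides[-1]*s); strides[-1] via pyGetD (strides is never empty)
    let strides := rev.foldl (fun strides s => strides ++ [PySem.List.pyGetD strides (-1) 0 * s]) [itemsize]
    (PySem.List.slice? strides none none (-1)).getD []   -- strides[::-1]
  else []

-- ===== PORT B =====
-- suffix_prod i: p = 1; for s in shape[i+1:]: p *= s  — shape[i+1:] with i : Nat (from range(len)) is List.drop (i+1), exact for nonnegative start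
def c_contiguous_strides_alt (itemsize : Int) (shape : List Int) : List Int :=
  (List.range shape.length).map
    (fun i => itemsize * (shape.drop (i + 1)).foldl (· * ·) 1)

-- ===== PRECONDITION & SPEC =====
def Spec_c_contiguous_strides (itemsize : Int) (shape : List Int) (out : List Int) : Prop := out = c_contiguous_strides_alt itemsize shape
instance (itemsize : Int) (shape : List Int) (out : List Int) : Decidable (Spec_c_contiguous_strides itemsize shape out) := by unfold Spec_c_contiguous_strides; infer_instance

-- ===== CLAIM (what is proved, stated in full; the proofs are below) =====
def Claim_equal_c_contiguous_strides : Prop := ∀ (itemsize : Int) (shape : List Int), Dom_c_contiguous_strides itemsize shape → Spec_c_contiguous_strides itemsize shape (c_contiguous_strides itemsize shape)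

-- ===== LEMMAS AND PROOFS =====

-- shape[:0:-1] is the reverse of the tail
lemma pv_slice_tail_rev (xs : List Int) :
    PySem.List.slice? xs none (some 0) (-1) = some xs.tail.reverse := by
  cases xs with
  | nil => rfl
  | cons x t =>
    unfold PySem.List.slice? PySem.List.sliceIndices
    norm_num
    rw [show (if 0 < t.length then t.length else 0) = t.length by split <;> omega]
    apply List.ext_getElem (by simp)
    intro k h1 h2
    have hk : k < t.length := by simpa using h1
    simp only [List.getElem_map, List.getElem_range, List.getElem_reverse]
    have h3 : ((t.length : Int) + -(k : Int)).toNat = (t.length - 1 - k) + 1 := by omega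
    simp_rw [h3]
    rw [List.getElem_cons_succ]

-- A's accumulating loop, characterised: the strides list (before the final reversal)
lemma pv_fold (x : Int) (t : List Int) :
    t.reverse.foldl (fun acc s => acc ++ [PySem.List.pyGetD acc (-1) 0 * s]) [x]
      = ((List.range (t.length + 1)).map (fun i => x * (t.drop i).prod)).reverse := by
  induction t with
  | nil => simp
  | cons a t' ih =>
    have hlast : PySem.List.pyGetD
        (((List.range (t'.length + 1)).map (fun i => x * (t'.drop i).prod)).reverse) (-1) 0
        = x * t'.prod := by
      rw [List.range_succ_eq_map, List.map_cons, List.reverse_cons,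
        PySem.List.pyGetD_neg_one_append_singleton]
      simp
    rw [List.reverse_cons, List.foldl_append, ih, List.foldl_cons, List.foldl_nil, hlast]
    conv_rhs => rw [List.length_cons, List.range_succ_eq_map, List.map_cons,
      List.reverse_cons, List.map_map]
    congr 1
    simp [List.prod_cons]; ring

-- ===== VERDICT (by name: the statement is the Claim_ definition above) =====
theorem c_contiguous_strides_spec : Claim_equal_c_contiguous_strides := by
  intro itemsize shape _
  unfold Spec_c_contiguous_strides c_contiguous_strides c_contiguous_strides_alt
  cases shape with
  | nil => simp
  | cons s0 t =>
    simp only [ne_eq, reduceCtorEq, not_false_eq_true, if_pos, pv_slice_tail_rev,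
      Option.getD_some, List.tail_cons, pv_fold, PySem.List.slice?_none_none_neg_one,
      List.reverse_reverse, List.length_cons, List.drop_succ_cons]
    exact List.map_congr_left (fun i _ => by rw [List.prod_eq_foldl])
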